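-- pv_equiv track=rewrite | github.com/hamtoy/Test | src/infra/lats_worker.py | ensure_required_actions
-- ===== SOURCE A (Python) =====
-- def ensure_required_actions(actions: list[str], request_id: str) -> list[str]:
--     """Ensure required action types are present."""
--     required = {
--         "clean": f"clean:{request_id}",
--         "summarize": f"summarize:{request_id}",
--         "clarify": f"clarify:{request_id}",
--     }
--     for prefix, act in required.items():
--         if not any(a.startswith(prefix + ":") for a in actions):
--             actions.append(act)
--     return actions
-- ===== SOURCE B (Python) =====
-- def ensure_required_actions(actions: list[str], request_id: str) -> list[str]:
--     """Ensure required action types are present."""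
--     missing = [(p, f"{p}:{request_id}") for p in ("clean", "summarize", "clarify")]
--     for a in actions:
--         if not missing:
--             break
--         missing = [(p, act) for (p, act) in missing if not a.startswith(p + ":")]
--     actions.extend(act for _, act in missing)
--     return actions
-- ===== Notes on version B (the rewrite author's own statement) =====
-- stated objective: alternative
-- what changed: B transposes the traversal: one pass over actions threads a shrinking worklist of still-missing (prefix, action) pairs (with early exit once empty) and appends whatever remains, instead of A's per-prefix any() rescans of the growing list.
import Mathlib
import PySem

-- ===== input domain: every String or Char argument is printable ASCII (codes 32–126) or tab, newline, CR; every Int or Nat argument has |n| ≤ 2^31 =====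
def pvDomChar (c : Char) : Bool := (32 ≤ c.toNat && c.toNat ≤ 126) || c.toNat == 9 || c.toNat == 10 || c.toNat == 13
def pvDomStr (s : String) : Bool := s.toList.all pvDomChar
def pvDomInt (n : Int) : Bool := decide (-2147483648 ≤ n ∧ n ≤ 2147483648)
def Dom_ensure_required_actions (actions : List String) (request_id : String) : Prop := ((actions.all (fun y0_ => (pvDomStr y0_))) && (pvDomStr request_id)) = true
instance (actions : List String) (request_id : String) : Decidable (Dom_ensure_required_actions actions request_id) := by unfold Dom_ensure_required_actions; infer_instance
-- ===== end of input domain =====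

-- B transposes A's traversal: instead of A's three per-prefix any() rescans of the
-- (growing) list, B makes one pass over `actions` threading a shrinking worklist of
-- still-missing (prefix, action) pairs (early exit once empty) and appends what remains
-- (objective: alternative; both programs extend `actions` in place identically, the
-- equivalence proved here is about the return value).

-- ===== PORT A =====
def ensure_required_actions (actions : List String) (request_id : String) : List String :=
  let required : PySem.Dict String String :=
    PySem.Dict.mk
    [("clean", "clean:" ++ request_id),
     ("summarize", "summarize:" ++ request_id),
     ("clarify", "clarify:" ++ request_id)]
  (PySem.Dict.items required).foldl
    (fun acts pa =>
      if !(acts.any (fun a => PySem.Str.startswith a (pa.1 ++ ":"))) then acts ++ [pa.2]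
      else acts)
    actions

-- ===== PORT B =====
def ensure_required_actions_alt (actions : List String) (request_id : String) : List String :=
  let missing0 : List (String × String) :=
    ["clean", "summarize", "clarify"].map (fun p => (p, p ++ ":" ++ request_id))
  let missing : List (String × String) :=
    actions.foldl
      (fun m a =>
        if m.isEmpty then m
        else m.filter (fun pa => !(PySem.Str.startswith a (pa.1 ++ ":"))))
      missing0
  actions ++ missing.map Prod.snd

-- ===== PRECONDITION & SPEC =====
def Spec_ensure_required_actions (actions : List String) (request_id : String) (out : List String) : Prop := out = ensure_required_actions_alt actions request_id
instance (actions : List String) (request_id : String) (out : List String) : Decidable (Spec_ensure_required_actions actions request_id out) := by unfold Spec_ensure_required_actions; infer_instance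

-- ===== CLAIM (what is proved, stated in full; the proofs are below) =====
def Claim_equal_ensure_required_actions : Prop := ∀ (actions : List String) (request_id : String), Dom_ensure_required_actions actions request_id → Spec_ensure_required_actions actions request_id (ensure_required_actions actions request_id)

-- ===== LEMMAS AND PROOFS =====

-- B's single pass with a shrinking worklist computes a filter by "no action matches"
theorem fold_filter (acts : List String) (m : List (String × String)) :
    acts.foldl
        (fun m a =>
          if m.isEmpty then m
          else m.filter (fun pa => !(PySem.Str.startswith a (pa.1 ++ ":")))) m
      = m.filter (fun pa => !(acts.any (fun a => PySem.Str.startswith a (pa.1 ++ ":")))) := by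
  induction acts generalizing m with
  | nil => simp
  | cons a t ih =>
    simp only [List.foldl_cons]
    by_cases hm : m.isEmpty
    · have hnil : m = [] := by simpa using hm
      subst hnil
      clear ih
      induction t with
      | nil => simp
      | cons b tb ihh => simpa using ihh
    · rw [if_neg (by simpa using hm), ih, List.filter_filter]
      apply List.filter_congr
      intro pa _
      simp [Bool.not_or, Bool.and_comm]

-- an appended action 'x:…' does not start with a different required prefix
theorem not_startswith_head (c d : Char) (h : c ≠ d) (t p : List Char) :
    PySem.Chars.startswith (c :: t) (d :: p) = false := by
  simp [PySem.Chars.startswith, List.isPrefixOf, Ne.symm h]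

theorem not_sw_clean_summ (r : String) :
    PySem.Str.startswith ("clean:" ++ r) ("summarize" ++ ":") = false := by
  rw [PySem.Str.startswith_eq]
  have h1 : ("clean:" ++ r).toList = 'c' :: ("lean:".toList ++ r.toList) := by simp
  have h2 : ("summarize" ++ ":").toList = 's' :: "ummarize:".toList := by simp
  rw [h1, h2]; exact not_startswith_head _ _ (by decide) _ _

theorem not_sw_clean_clar (r : String) :
    PySem.Str.startswith ("clean:" ++ r) ("clarify" ++ ":") = false := by
  rw [PySem.Str.startswith_eq]
  have h1 : ("clean:" ++ r).toList = 'c' :: 'l' :: 'e' :: ("an:".toList ++ r.toList) := by simp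
  have h2 : ("clarify" ++ ":").toList = 'c' :: 'l' :: 'a' :: "rify:".toList := by simp
  rw [h1, h2]
  simp [PySem.Chars.startswith, List.isPrefixOf]

theorem not_sw_summ_clar (r : String) :
    PySem.Str.startswith ("summarize:" ++ r) ("clarify" ++ ":") = false := by
  rw [PySem.Str.startswith_eq]
  have h1 : ("summarize:" ++ r).toList = 's' :: ("ummarize:".toList ++ r.toList) := by simp
  have h2 : ("clarify" ++ ":").toList = 'c' :: "larify:".toList := by simp
  rw [h1, h2]; exact not_startswith_head _ _ (by decide) _ _

-- f-string assembly: p + ":" + rid for a literal p merges into the literal-colon form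
theorem fstr_merge (p c pc r : String) (h : p ++ c = pc) : p ++ c ++ r = pc ++ r := by
  rw [← h, String.append_assoc]

-- ===== VERDICT (by name: the statement is the Claim_ definition above) =====
theorem ensure_required_actions_spec : Claim_equal_ensure_required_actions := by
  intro actions request_id _
  unfold Spec_ensure_required_actions ensure_required_actions ensure_required_actions_alt
  simp only [List.map_cons, List.map_nil, fold_filter]
  have e1 : ("clean" : String) ++ ":" ++ request_id = "clean:" ++ request_id :=
    fstr_merge _ _ _ _ rfl
  have e2 : ("summarize" : String) ++ ":" ++ request_id = "summarize:" ++ request_id :=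
    fstr_merge _ _ _ _ rfl
  have e3 : ("clarify" : String) ++ ":" ++ request_id = "clarify:" ++ request_id :=
    fstr_merge _ _ _ _ rfl
  simp only [e1, e2, e3]
  cases h1 : actions.any (fun a => PySem.Str.startswith a ("clean" ++ ":")) <;>
    cases h2 : actions.any (fun a => PySem.Str.startswith a ("summarize" ++ ":")) <;>
      cases h3 : actions.any (fun a => PySem.Str.startswith a ("clarify" ++ ":")) <;>
        simp only [PySem.Dict.items, List.foldl_cons, List.foldl_nil,
          List.filter_cons, List.filter_nil, List.map_cons, List.map_nil,
          h1, h2, h3, List.any_append, List.any_cons, List.any_nil,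
          not_sw_clean_summ, not_sw_clean_clar, not_sw_summ_clar,
          Bool.not_true, Bool.not_false, Bool.or_false, Bool.false_or, Bool.or_self,
          Bool.false_eq_true,
          if_true, if_false] <;> simp
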